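-- pv_equiv track=rewrite | github.com/lulugaby/ICS33 | q1helper/q1solution.py | by_skill
-- ===== SOURCE A (Python) =====
-- def by_skill(db1 : {str:{str:int}}) -> [int,[str,[str]]]:
--     dic = {b:{job:{k for k,v in db1.items() for job_c,num_2 in v.items() if num_2==b and job==job_c} for k,v in db1.items() for job,num in v.items() if num==b } for k,v in db1.items() for a,b in v.items()}
--     num_sorted = sorted(dic.keys(), reverse=True)
--     product = []
--     for n in num_sorted:
--         num_product = (n,[])
--         for j in sorted(dic[n].keys()):
--             num_product[1].append((j, sorted([name for name in dic[n][j]])))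
--         product.append(num_product)
--     return product
-- ===== SOURCE B (Python) =====
-- def by_skill(db1 : {str:{str:int}}) -> [int,[str,[str]]]:
--     agg = {}
--     for name, jobs in db1.items():
--         for job, num in jobs.items():
--             agg.setdefault(num, {}).setdefault(job, set()).add(name)
--     return [(n, [(j, sorted(agg[n][j])) for j in sorted(agg[n])])
--             for n in sorted(agg, reverse=True)]
-- ===== Notes on version B (the rewrite author's own statement) =====
-- stated objective: faster
-- what changed: Replaces the triple-nested dict/set comprehensions that rescan the whole database for every (skill, job) pair with a single pass that aggregates into skill->job->set-of-names, followed by sorting.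
import Mathlib
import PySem

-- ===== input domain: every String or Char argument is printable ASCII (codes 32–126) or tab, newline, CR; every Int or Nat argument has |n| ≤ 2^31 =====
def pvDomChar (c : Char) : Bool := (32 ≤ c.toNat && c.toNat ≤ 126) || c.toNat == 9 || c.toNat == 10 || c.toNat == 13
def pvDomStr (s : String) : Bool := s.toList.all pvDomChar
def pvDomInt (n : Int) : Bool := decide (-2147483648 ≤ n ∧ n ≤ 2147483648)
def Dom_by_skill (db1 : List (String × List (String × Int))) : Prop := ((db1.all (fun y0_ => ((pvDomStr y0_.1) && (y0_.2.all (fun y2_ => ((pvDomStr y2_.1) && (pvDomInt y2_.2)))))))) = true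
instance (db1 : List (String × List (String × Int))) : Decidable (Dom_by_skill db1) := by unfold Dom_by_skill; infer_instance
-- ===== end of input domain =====

-- B replaces A's triple-nested comprehensions (which rescan the whole database for every
-- (skill, job) pair) by one aggregation pass into skill -> job -> set of names, then sorts.

-- ===== PORT A =====
-- {k for k,v in db1.items() for job_c,num_2 in v.items() if num_2==b and job==job_c}
def pvSetA (db1 : List (String × List (String × Int))) (b : Int) (job : String) : PySem.Set String :=
  db1.foldl (fun s kv => kv.2.foldl
    (fun s jn => if jn.2 == b && job == jn.1 then PySem.Set.add s kv.1 else s) s) PySem.Set.empty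

-- {job: {…} for k,v in db1.items() for job,num in v.items() if num==b}
def pvInnerA (db1 : List (String × List (String × Int))) (b : Int) : PySem.Dict String (PySem.Set String) :=
  db1.foldl (fun d kv => kv.2.foldl
    (fun d jn => if jn.2 == b then d.insert jn.1 (pvSetA db1 b jn.1) else d) d) PySem.Dict.empty

-- dic = {b: {…} for k,v in db1.items() for a,b in v.items()}
def pvDicA (db1 : List (String × List (String × Int))) : PySem.Dict Int (PySem.Dict String (PySem.Set String)) :=
  db1.foldl (fun d kv => kv.2.foldl
    (fun d ab => d.insert ab.2 (pvInnerA db1 ab.2)) d) PySem.Dict.empty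

def by_skill (db1 : List (String × List (String × Int))) : List (Int × (List (String × List String))) :=
  let dic := pvDicA db1
  let num_sorted := PySem.List.sorted dic.keys (fun x => x) true
  num_sorted.foldl (fun product n =>
    -- dic[n]: n is always a key of dic, so the default is never reached
    let dn := dic.getD n PySem.Dict.empty
    let inner := (PySem.List.sorted dn.keys (fun x => x) false).foldl
        (fun acc j => acc ++ [(j, PySem.List.sorted (dn.getD j PySem.Set.empty) (fun x => x) false)]) []
    product ++ [(n, inner)]) []

-- ===== PORT B =====
-- agg.setdefault(num, {}).setdefault(job, set()).add(name), written back
def pvStepB (d : PySem.Dict Int (PySem.Dict String (PySem.Set String))) (name job : String) (num : Int) :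
    PySem.Dict Int (PySem.Dict String (PySem.Set String)) :=
  let inner := d.getD num PySem.Dict.empty
  let s := inner.getD job PySem.Set.empty
  d.insert num (inner.insert job (PySem.Set.add s name))

def pvAggB (db1 : List (String × List (String × Int))) : PySem.Dict Int (PySem.Dict String (PySem.Set String)) :=
  db1.foldl (fun d kv => kv.2.foldl (fun d jn => pvStepB d kv.1 jn.1 jn.2) d) PySem.Dict.empty

def by_skill_alt (db1 : List (String × List (String × Int))) : List (Int × (List (String × List String))) :=
  let agg := pvAggB db1
  (PySem.List.sorted agg.keys (fun x => x) true).map (fun n =>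
    let dn := agg.getD n PySem.Dict.empty
    (n, (PySem.List.sorted dn.keys (fun x => x) false).map
          (fun j => (j, PySem.List.sorted (dn.getD j PySem.Set.empty) (fun x => x) false))))

-- ===== PRECONDITION & SPEC =====
def Spec_by_skill (db1 : List (String × List (String × Int))) (out : List (Int × (List (String × List String)))) : Prop := out = by_skill_alt db1
instance (db1 : List (String × List (String × Int))) (out : List (Int × (List (String × List String)))) : Decidable (Spec_by_skill db1 out) := by unfold Spec_by_skill; infer_instance

-- ===== CLAIM (what is proved, stated in full; the proofs are below) =====
def Claim_equal_by_skill : Prop := ∀ (db1 : List (String × List (String × Int))), Dom_by_skill db1 → Spec_by_skill db1 (by_skill db1)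

-- ===== LEMMAS AND PROOFS =====

-- a dict whose value at each key k of l is f k
def pvMkC {κ ν : Type} (l : List κ) (f : κ → ν) : PySem.Dict κ ν :=
  PySem.Dict.mk (l.map (fun k => (k, f k)))

theorem pv_foldl_guard {δ α β : Type} (ts : List α) (c : α → Bool) (h : α → β)
    (g : δ → β → δ) (init : δ) :
    ts.foldl (fun d t => if c t then g d (h t) else d) init
      = ((ts.filter c).map h).foldl g init := by
  induction ts generalizing init with
  | nil => rfl
  | cons t ts ih =>
    simp only [List.foldl_cons, List.filter_cons]
    by_cases hc : c t <;> simp [hc, ih]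

theorem pv_ofList_append {α : Type} [BEq α] (us : List α) (x : α) :
    PySem.Set.ofList (us ++ [x]) = PySem.Set.add (PySem.Set.ofList us) x := by
  simp [PySem.Set.ofList_eq_foldl, List.foldl_append]

theorem pv_mkC_congr {κ ν : Type} (l : List κ) (f g : κ → ν) (h : ∀ k ∈ l, f k = g k) :
    pvMkC l f = pvMkC l g := by
  unfold pvMkC
  congr 1
  exact List.map_congr_left (fun k hk => by rw [h k hk])

theorem pv_insert_mkC {κ ν : Type} [BEq κ] [LawfulBEq κ] (l : List κ) (f : κ → ν) (k₀ : κ) (v : ν) :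
    (pvMkC l f).insert k₀ v = pvMkC (PySem.Set.add l k₀) (fun k => if k == k₀ then v else f k) := by
  unfold pvMkC PySem.Dict.insert PySem.Set.add
  by_cases hc : k₀ ∈ l
  · have h1 : PySem.Dict.contains (PySem.Dict.mk (l.map (fun k => (k, f k)))) k₀ = true := by
      simp; exact hc
    have h2 : PySem.Set.contains l k₀ = true := by
      simp; exact hc
    simp only [h1, h2, if_pos]
    congr 1
    simp only [List.map_map]
    refine List.map_congr_left (fun k hk => ?_)
    by_cases hk0 : k = k₀ <;> simp [hk0]
  · have h1 : PySem.Dict.contains (PySem.Dict.mk (l.map (fun k => (k, f k)))) k₀ = false := by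
      simp; exact fun x hx he => hc (he ▸ hx)
    have h2 : PySem.Set.contains l k₀ = false := by
      simp; exact hc
    simp only [h1, h2, Bool.false_eq_true, if_false]
    congr 1
    simp only [List.map_append, List.map_cons, List.map_nil, BEq.rfl, if_pos]
    congr 1
    refine List.map_congr_left (fun k hk => ?_)
    have : k ≠ k₀ := fun h => hc (h ▸ hk)
    simp [this]

theorem pv_getD_mkC {κ ν : Type} [BEq κ] [LawfulBEq κ] (l : List κ) (f : κ → ν) (k₀ : κ) (d0 : ν) :
    (pvMkC l f).getD k₀ d0 = if k₀ ∈ l then f k₀ else d0 := by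
  induction l with
  | nil => simp [pvMkC, PySem.Dict.getD_eq_get?_getD, PySem.Dict.get?]
  | cons k ks ih =>
    simp only [pvMkC, List.map_cons] at *
    rw [PySem.Dict.getD_eq_get?_getD, PySem.Dict.get?_mk_cons]
    by_cases hk : k = k₀
    · simp [hk]
    · have : (k == k₀) = false := by simpa using hk
      rw [this]
      simp only [Bool.false_eq_true, if_false]
      rw [← PySem.Dict.getD_eq_get?_getD] at *
      rw [ih]
      simp [List.mem_cons, Ne.symm hk]

def pvTriples (db1 : List (String × List (String × Int))) : List (String × String × Int) :=
  db1.flatMap (fun kv => kv.2.map (fun jn => (kv.1, jn.1, jn.2)))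

theorem pv_foldl_double {δ : Type} (db1 : List (String × List (String × Int)))
    (step : δ → String → String → Int → δ) (init : δ) :
    db1.foldl (fun d kv => kv.2.foldl (fun d jn => step d kv.1 jn.1 jn.2) d) init
      = (pvTriples db1).foldl (fun d t => step d t.1 t.2.1 t.2.2) init := by
  induction db1 generalizing init with
  | nil => rfl
  | cons kv rest ih =>
    simp only [pvTriples, List.flatMap_cons, List.foldl_cons, List.foldl_append, List.foldl_map]
    exact ih _

theorem pv_foldl_insert_fun {κ ν : Type} [BEq κ] [LawfulBEq κ] (ks : List κ) (f : κ → ν) :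
    ∀ us : List κ,
      ks.foldl (fun d k => d.insert k (f k)) (pvMkC (PySem.Set.ofList us) f)
        = pvMkC (PySem.Set.ofList (us ++ ks)) f := by
  induction ks with
  | nil => intro us; simp
  | cons k ks ih =>
    intro us
    have hstep : (pvMkC (PySem.Set.ofList us) f).insert k (f k)
        = pvMkC (PySem.Set.ofList (us ++ [k])) f := by
      rw [pv_insert_mkC, pv_ofList_append]
      exact pv_mkC_congr _ _ _ (fun x _ => by by_cases hx : x = k <;> simp [hx])
    simp only [List.foldl_cons, hstep]
    rw [ih (us ++ [k])]
    simp

theorem pv_foldl_append_map {α β : Type} (l : List α) (f : α → β) :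
    ∀ acc : List β, l.foldl (fun a x => a ++ [f x]) acc = acc ++ l.map f := by
  induction l with
  | nil => simp
  | cons x l ih => intro acc; simp [ih]

def pvNames (ts : List (String × String × Int)) (b : Int) (j : String) : PySem.Set String :=
  PySem.Set.ofList ((ts.filter (fun t => t.2.2 == b && j == t.2.1)).map (·.1))

def pvJobs (ts : List (String × String × Int)) (b : Int) : PySem.Set String :=
  PySem.Set.ofList ((ts.filter (fun t => t.2.2 == b)).map (·.2.1))

def pvNums (ts : List (String × String × Int)) : PySem.Set Int :=
  PySem.Set.ofList (ts.map (·.2.2))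

def pvCanon (ts : List (String × String × Int)) : PySem.Dict Int (PySem.Dict String (PySem.Set String)) :=
  pvMkC (pvNums ts) (fun n => pvMkC (pvJobs ts n) (fun j => pvNames ts n j))

theorem pv_setA (db1 : List (String × List (String × Int))) (b : Int) (j : String) :
    pvSetA db1 b j = pvNames (pvTriples db1) b j := by
  have h1 : pvSetA db1 b j = (pvTriples db1).foldl
      (fun s t => if t.2.2 == b && j == t.2.1 then PySem.Set.add s t.1 else s) PySem.Set.empty :=
    pv_foldl_double db1 (fun s name jb num => if num == b && j == jb then PySem.Set.add s name else s) _
  have h2 : (pvTriples db1).foldl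
      (fun s t => if t.2.2 == b && j == t.2.1 then PySem.Set.add s t.1 else s) PySem.Set.empty
      = (((pvTriples db1).filter (fun t => t.2.2 == b && j == t.2.1)).map (·.1)).foldl
          PySem.Set.add PySem.Set.empty :=
    pv_foldl_guard _ _ _ _ _
  rw [h1, h2, pvNames, PySem.Set.ofList_eq_foldl]
  rfl

theorem pv_innerA (db1 : List (String × List (String × Int))) (b : Int) :
    pvInnerA db1 b = pvMkC (pvJobs (pvTriples db1) b) (fun j => pvNames (pvTriples db1) b j) := by
  have h1 : pvInnerA db1 b = (pvTriples db1).foldl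
      (fun d t => if t.2.2 == b then d.insert t.2.1 (pvSetA db1 b t.2.1) else d) PySem.Dict.empty :=
    pv_foldl_double db1 (fun d _ jb num => if num == b then PySem.Dict.insert d jb (pvSetA db1 b jb) else d) _
  have h2 : (pvTriples db1).foldl
      (fun d t => if t.2.2 == b then d.insert t.2.1 (pvSetA db1 b t.2.1) else d) PySem.Dict.empty
      = (((pvTriples db1).filter (fun t => t.2.2 == b)).map (·.2.1)).foldl
          (fun d j => d.insert j (pvSetA db1 b j)) PySem.Dict.empty :=
    pv_foldl_guard (pvTriples db1) (fun t => t.2.2 == b) (fun t => t.2.1)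
      (fun d j => PySem.Dict.insert d j (pvSetA db1 b j)) PySem.Dict.empty
  rw [h1, h2]
  simp only [pv_setA]
  have h3 := pv_foldl_insert_fun (((pvTriples db1).filter (fun t => t.2.2 == b)).map (·.2.1))
      (fun j => pvNames (pvTriples db1) b j) []
  simpa [pvJobs, pvMkC] using h3

theorem pv_dicA (db1 : List (String × List (String × Int))) :
    pvDicA db1 = pvCanon (pvTriples db1) := by
  have h1 : pvDicA db1 = (pvTriples db1).foldl
      (fun d t => d.insert t.2.2 (pvInnerA db1 t.2.2)) PySem.Dict.empty :=
    pv_foldl_double db1 (fun d _ _ num => PySem.Dict.insert d num (pvInnerA db1 num)) _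
  rw [h1]
  simp only [pv_innerA]
  rw [← List.foldl_map (f := fun t : String × String × Int => t.2.2)
      (g := fun d n => PySem.Dict.insert d n (pvMkC (pvJobs (pvTriples db1) n) (fun j => pvNames (pvTriples db1) n j)))]
  have h3 := pv_foldl_insert_fun ((pvTriples db1).map (·.2.2))
      (fun n => pvMkC (pvJobs (pvTriples db1) n) (fun j => pvNames (pvTriples db1) n j)) []
  simpa [pvCanon, pvNums, pvMkC] using h3

theorem pv_jobs_nil_of_not_mem (us : List (String × String × Int)) (num : Int)
    (h : num ∉ us.map (·.2.2)) : pvJobs us num = [] := by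
  unfold pvJobs
  have : us.filter (fun t => t.2.2 == num) = [] := by
    rw [List.filter_eq_nil_iff]
    intro t ht
    simp only [beq_iff_eq]
    exact fun he => h (he ▸ List.mem_map_of_mem ht)
  simp [this, PySem.Set.ofList]

theorem pv_names_nil_of_not_mem (us : List (String × String × Int)) (num : Int) (j : String)
    (h : j ∉ pvJobs us num) : pvNames us num j = [] := by
  unfold pvNames
  have : us.filter (fun t => t.2.2 == num && j == t.2.1) = [] := by
    rw [List.filter_eq_nil_iff]
    intro t ht hc
    simp only [Bool.and_eq_true, beq_iff_eq] at hc
    refine h ?_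
    unfold pvJobs
    rw [PySem.Set.mem_ofList]
    refine List.mem_map.2 ⟨t, List.mem_filter.2 ⟨ht, by simp [hc.1]⟩, hc.2.symm⟩
  simp [this, PySem.Set.ofList]

theorem pv_canon_getD (us : List (String × String × Int)) (num : Int) :
    (pvCanon us).getD num PySem.Dict.empty
      = pvMkC (pvJobs us num) (fun j => pvNames us num j) := by
  unfold pvCanon
  rw [pv_getD_mkC]
  split
  · rfl
  · next h =>
    rw [pv_jobs_nil_of_not_mem us num (by
      intro hm
      exact h (by unfold pvNums; rw [PySem.Set.mem_ofList]; exact hm))]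
    rfl

theorem pv_inner_getD (us : List (String × String × Int)) (num : Int) (job : String) :
    (pvMkC (pvJobs us num) (fun j => pvNames us num j)).getD job PySem.Set.empty
      = pvNames us num job := by
  rw [pv_getD_mkC]
  split
  · rfl
  · next h => rw [pv_names_nil_of_not_mem us num job h]; rfl

theorem pv_jobs_append (us : List (String × String × Int)) (t : String × String × Int) (n : Int) :
    pvJobs (us ++ [t]) n
      = if t.2.2 = n then PySem.Set.add (pvJobs us n) t.2.1 else pvJobs us n := by
  unfold pvJobs
  rw [List.filter_append]
  by_cases h : t.2.2 = n
  · simp [h, pv_ofList_append]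
  · simp [h]

theorem pv_names_append (us : List (String × String × Int)) (t : String × String × Int)
    (n : Int) (j : String) :
    pvNames (us ++ [t]) n j
      = if t.2.2 = n ∧ j = t.2.1 then PySem.Set.add (pvNames us n j) t.1 else pvNames us n j := by
  unfold pvNames
  rw [List.filter_append]
  by_cases h : t.2.2 = n ∧ j = t.2.1
  · simp [h.1, h.2, pv_ofList_append]
  · have hb : (t.2.2 == n && j == t.2.1) = false := by
      rcases not_and_or.mp h with h1 | h1 <;> simp [h1]
    rw [if_neg h]
    simp [hb]

theorem pv_nums_append (us : List (String × String × Int)) (t : String × String × Int) :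
    pvNums (us ++ [t]) = PySem.Set.add (pvNums us) t.2.2 := by
  unfold pvNums
  simp only [List.map_append, List.map_cons, List.map_nil, pv_ofList_append]

theorem pv_stepB_canon (us : List (String × String × Int)) (name job : String) (num : Int) :
    pvStepB (pvCanon us) name job num = pvCanon (us ++ [(name, job, num)]) := by
  unfold pvStepB
  simp only [pv_canon_getD, pv_inner_getD]
  rw [pv_insert_mkC]
  conv_lhs => rw [pvCanon]
  rw [pv_insert_mkC]
  conv_rhs => rw [pvCanon]
  rw [pv_nums_append]
  refine pv_mkC_congr _ _ _ (fun n _ => ?_)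
  by_cases hn : n = num
  · subst hn
    simp only [BEq.rfl, if_pos]
    rw [pv_jobs_append us (name, job, n) n,
       if_pos (show ((name, job, n) : String × String × Int).2.2 = n from rfl)]
    refine pv_mkC_congr _ _ _ (fun j _ => ?_)
    rw [pv_names_append us (name, job, n) n j]
    by_cases hj : j = job
    · subst hj; simp
    · have h1 : (j == job) = false := by simp [hj]
      rw [h1, if_neg (fun hh : _ ∧ _ => hj hh.2)]
      simp
  · have h1 : (n == num) = false := by simp [hn]
    rw [h1]
    simp only [Bool.false_eq_true, if_false]
    rw [pv_jobs_append]
    have h2 : ¬ ((name, job, num) : String × String × Int).2.2 = n := fun hh => hn (hh.symm)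
    rw [if_neg h2]
    refine pv_mkC_congr _ _ _ (fun j _ => ?_)
    rw [pv_names_append]
    rw [if_neg (fun hh => h2 hh.1)]

theorem pv_aggB (db1 : List (String × List (String × Int))) :
    pvAggB db1 = pvCanon (pvTriples db1) := by
  have h1 : pvAggB db1 = (pvTriples db1).foldl
      (fun d t => pvStepB d t.1 t.2.1 t.2.2) PySem.Dict.empty :=
    pv_foldl_double db1 (fun d name jb num => pvStepB d name jb num) _
  have main : ∀ (ts us : List (String × String × Int)),
      ts.foldl (fun d t => pvStepB d t.1 t.2.1 t.2.2) (pvCanon us) = pvCanon (us ++ ts) := by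
    intro ts
    induction ts with
    | nil => intro us; simp
    | cons t ts ih =>
      intro us
      simp only [List.foldl_cons]
      rw [pv_stepB_canon us t.1 t.2.1 t.2.2]
      have := ih (us ++ [(t.1, t.2.1, t.2.2)])
      simpa using this
  have h0 : (PySem.Dict.empty : PySem.Dict Int (PySem.Dict String (PySem.Set String))) = pvCanon [] := rfl
  rw [h1, h0, main (pvTriples db1) []]
  simp

-- ===== VERDICT (by name: the statement is the Claim_ definition above) =====
theorem by_skill_spec : Claim_equal_by_skill := by
  intro db1 _
  unfold Spec_by_skill by_skill by_skill_alt
  rw [pv_dicA, pv_aggB]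
  simp only [pv_foldl_append_map, List.nil_append]
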